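-- pv_equiv track=rewrite | github.com/dylanyunlon/operatorRL | integrations/lol/src/lol_agent/team_color_resolver.py | is_ally
-- ===== SOURCE A (Python) =====
-- from typing import Any, Callable, Optional
--
-- def is_ally(puuid_a: str, puuid_b: str, participants: list[dict[str, Any]]) -> bool:
--     team_a = team_b = None
--     for p in participants:
--         if p.get("puuid") == puuid_a:
--             team_a = p.get("teamId")
--         if p.get("puuid") == puuid_b:
--             team_b = p.get("teamId")
--     if team_a is None or team_b is None:
--         return False
--     return team_a == team_b
-- ===== SOURCE B (Python) =====
-- def is_ally(puuid_a, puuid_b, participants):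
--     def team_of(puuid):
--         for p in reversed(participants):
--             if p.get("puuid") == puuid:
--                 return p.get("teamId")
--         return None
--     team_a = team_of(puuid_a)
--     team_b = team_of(puuid_b)
--     return team_a is not None and team_b is not None and team_a == team_b
-- ===== Notes on version B (the rewrite author's own statement) =====
-- stated objective: alternative
-- what changed: Replaces the single forward scan carrying two mutable accumulators (last match wins) by two independent backward searches with early exit: the first match from the end is exactly the last match from the front.
import Mathlib
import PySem

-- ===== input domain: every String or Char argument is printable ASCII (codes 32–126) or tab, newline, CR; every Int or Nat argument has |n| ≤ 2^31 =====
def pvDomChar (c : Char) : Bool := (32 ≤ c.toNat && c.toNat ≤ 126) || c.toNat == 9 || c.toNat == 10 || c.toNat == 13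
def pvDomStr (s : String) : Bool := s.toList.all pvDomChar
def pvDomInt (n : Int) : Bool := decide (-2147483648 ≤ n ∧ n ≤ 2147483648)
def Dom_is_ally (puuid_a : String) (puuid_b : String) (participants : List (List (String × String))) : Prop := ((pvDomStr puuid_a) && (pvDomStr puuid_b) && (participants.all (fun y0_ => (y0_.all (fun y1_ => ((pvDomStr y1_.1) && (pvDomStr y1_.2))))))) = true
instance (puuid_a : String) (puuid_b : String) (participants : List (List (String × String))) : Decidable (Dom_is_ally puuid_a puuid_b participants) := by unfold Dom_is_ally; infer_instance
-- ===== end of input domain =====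

-- B replaces A's single forward scan with two last-wins accumulators by two independent
-- backward searches with early exit (alternative decomposition, same asymptotic cost).

-- dict.get(k): first-match lookup on the association list (shared dict primitive)
def pvGet (p : List (String × String)) (k : String) : Option String :=
  match p.find? (fun kv => kv.1 == k) with
  | some kv => some kv.2
  | none => none

-- ===== PORT A =====
def is_ally (puuid_a : String) (puuid_b : String) (participants : List (List (String × String))) : Bool :=
  let st := participants.foldl
    (fun (s : Option String × Option String) p =>
      let s1 := if pvGet p "puuid" == some puuid_a then (pvGet p "teamId", s.2) else s
      let s2 := if pvGet p "puuid" == some puuid_b then (s1.1, pvGet p "teamId") else s1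
      s2)
    (none, none)
  match st with
  | (some ta, some tb) => ta == tb
  | _ => false

-- ===== PORT B =====
-- team_of: first participant FROM THE END whose "puuid" equals the given one
def team_of (participants : List (List (String × String))) (puuid : String) : Option String :=
  match participants.reverse.find? (fun p => pvGet p "puuid" == some puuid) with
  | some p => pvGet p "teamId"
  | none => none

def is_ally_alt (puuid_a : String) (puuid_b : String) (participants : List (List (String × String))) : Bool :=
  let team_a := team_of participants puuid_a
  let team_b := team_of participants puuid_b
  team_a.isSome && team_b.isSome && team_a == team_b

-- ===== PRECONDITION & SPEC =====
def Spec_is_ally (puuid_a : String) (puuid_b : String) (participants : List (List (String × String))) (out : Bool) : Prop := out = is_ally_alt puuid_a puuid_b participants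
instance (puuid_a : String) (puuid_b : String) (participants : List (List (String × String))) (out : Bool) : Decidable (Spec_is_ally puuid_a puuid_b participants out) := by unfold Spec_is_ally; infer_instance

-- ===== CLAIM (what is proved, stated in full; the proofs are below) =====
def Claim_equal_is_ally : Prop := ∀ (puuid_a : String) (puuid_b : String) (participants : List (List (String × String))), Dom_is_ally puuid_a puuid_b participants → Spec_is_ally puuid_a puuid_b participants (is_ally puuid_a puuid_b participants)

-- ===== LEMMAS AND PROOFS =====

-- A's foldl with two last-wins accumulators equals, component-wise, the backward first match.
theorem foldl_eq_team_of (puuid_a puuid_b : String)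
    (participants : List (List (String × String))) (init : Option String × Option String) :
    participants.foldl
      (fun (s : Option String × Option String) p =>
        let s1 := if pvGet p "puuid" == some puuid_a then (pvGet p "teamId", s.2) else s
        let s2 := if pvGet p "puuid" == some puuid_b then (s1.1, pvGet p "teamId") else s1
        s2)
      init
    = ((match participants.reverse.find? (fun p => pvGet p "puuid" == some puuid_a) with
        | some p => pvGet p "teamId" | none => init.1),
       (match participants.reverse.find? (fun p => pvGet p "puuid" == some puuid_b) with
        | some p => pvGet p "teamId" | none => init.2)) := by
  induction participants generalizing init with
  | nil => simp
  | cons p l ih =>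
    simp only [List.foldl_cons, List.reverse_cons, List.find?_append]
    rw [ih]
    cases ha : l.reverse.find? (fun p => pvGet p "puuid" == some puuid_a) <;>
    cases hb : l.reverse.find? (fun p => pvGet p "puuid" == some puuid_b) <;>
      by_cases h1 : (pvGet p "puuid" == some puuid_a) = true <;>
      by_cases h2 : (pvGet p "puuid" == some puuid_b) = true <;>
        simp [h1, h2, List.find?]

theorem is_ally_spec : Claim_equal_is_ally := by
  intro puuid_a puuid_b participants _
  unfold Spec_is_ally is_ally is_ally_alt team_of
  rw [foldl_eq_team_of]
  cases ha : participants.reverse.find? (fun p => pvGet p "puuid" == some puuid_a) <;>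
  cases hb : participants.reverse.find? (fun p => pvGet p "puuid" == some puuid_b) <;>
    simp <;>
    rename_i pa pb <;>
    cases hta : pvGet pa "teamId" <;> cases htb : pvGet pb "teamId" <;> simp
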